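-- pv_equiv track=rewrite | github.com/sdobon/NLP-golden-globes | kmeans-awards.py | construct_name
-- ===== SOURCE A (Python) =====
-- def merge_overlap(a, b):
--     c = a.split()
--     d = b.split()
--     if c[-1] == d[0]:
--         final = c + d[1:]
--     elif d[-1] == c[0]:
--         final = d + c[1:]
--     else:
--         return None
--     s = ''
--     for w in final:
--         s += w + ' '
--     return s[:-1]
--
-- def construct_name(lst):
--     s = lst.pop(0)
--     for ng in lst:
--         merge = merge_overlap(s, ng)
--         if merge:
--             lst.remove(ng)
--             return construct_name( [merge] + lst)
--     return s
-- ===== SOURCE B (Python) =====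
-- # B: iterative worklist loop instead of A's recursion-with-list-rebuilding.
-- # Note: B mutates the argument list throughout the loop, while A stops mutating it
-- # after one pop(0) and one remove; the equivalence claimed is about the RETURN value.
-- def merge_overlap(a, b):
--     c = a.split()
--     d = b.split()
--     if c[-1] == d[0]:
--         final = c + d[1:]
--     elif d[-1] == c[0]:
--         final = d + c[1:]
--     else:
--         return None
--     s = ''
--     for w in final:
--         s += w + ' '
--     return s[:-1]
--
-- def construct_name(lst):
--     s = lst.pop(0)
--     while True:
--         for i, ng in enumerate(lst):
--             m = merge_overlap(s, ng)
--             if m: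
--                 s = m
--                 del lst[i]
--                 break
--         else:
--             return s
-- ===== Notes on version B (the rewrite author's own statement) =====
-- stated objective: simpler
-- what changed: A's tail recursion that rebuilds a fresh list [merge]+lst on every successful merge is replaced by a single iterative while-loop that keeps the current name in a variable and deletes the merged n-gram in place; merge_overlap is unchanged.
import Mathlib
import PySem

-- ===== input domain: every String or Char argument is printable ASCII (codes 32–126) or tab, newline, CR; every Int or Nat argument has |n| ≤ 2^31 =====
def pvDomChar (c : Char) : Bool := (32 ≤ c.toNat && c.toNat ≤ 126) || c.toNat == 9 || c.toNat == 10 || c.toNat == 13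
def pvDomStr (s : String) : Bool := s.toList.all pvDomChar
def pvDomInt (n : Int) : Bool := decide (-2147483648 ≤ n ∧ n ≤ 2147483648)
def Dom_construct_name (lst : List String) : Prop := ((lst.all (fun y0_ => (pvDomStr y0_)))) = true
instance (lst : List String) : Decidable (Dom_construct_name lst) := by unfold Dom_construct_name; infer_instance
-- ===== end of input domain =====

-- B replaces A's recursion (which rebuilds [merge]+lst each round) by one iterative
-- merge loop; both mutate the Python argument list (differently), so the claim is about
-- the return value only.


-- ===== PORT A =====
-- merge_overlap, shared verbatim by A and B (Source B keeps it unchanged).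
-- Python raises IndexError when a or b has no words; the port returns none there
-- (those inputs are excluded by Pre_construct_name).
def merge_overlap (a b : String) : Option String :=
  let c := PySem.Str.split₀ a
  let d := PySem.Str.split₀ b
  match PySem.List.pyGet? c (-1), PySem.List.pyGet? d 0 with
  | some clast, some d0 =>
    let final? : Option (List String) :=
      if clast = d0 then some (c ++ PySem.List.slice d (some 1) none)
      else
        match PySem.List.pyGet? d (-1), PySem.List.pyGet? c 0 with
        | some dlast, some c0 =>
          if dlast = c0 then some (d ++ PySem.List.slice c (some 1) none) else none
        | _, _ => none
    match final? with
    | none => none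
    | some final =>
      let s := final.foldl (fun s w => s ++ w ++ " ") ""
      some (PySem.Str.slice s none (some (-1)))
  | _, _ => none

-- A's `for ng in lst` scan: first ng whose merge is truthy, together with the merge.
def pyScanA (s : String) : List String → Option (String × String)
  | [] => none
  | ng :: rest =>
    match merge_overlap s ng with
    | some m => if m = "" then pyScanA s rest else some (ng, m)
    | none => pyScanA s rest

theorem pyScanA_sound (s : String) (l : List String) (ng m : String)
    (h : pyScanA s l = some (ng, m)) :
    ng ∈ l ∧ merge_overlap s ng = some m ∧ m ≠ "" := by
  induction l with
  | nil => simp [pyScanA] at h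
  | cons x rest ih =>
    simp only [pyScanA] at h
    cases hx : merge_overlap s x with
    | none =>
      rw [hx] at h
      rcases ih h with ⟨h1, h2, h3⟩
      exact ⟨List.mem_cons_of_mem _ h1, h2, h3⟩
    | some mx =>
      rw [hx] at h
      by_cases he : mx = ""
      · simp [he] at h
        rcases ih h with ⟨h1, h2, h3⟩
        exact ⟨List.mem_cons_of_mem _ h1, h2, h3⟩
      · simp [he] at h
        rcases h with ⟨h1, h2⟩
        subst h1; subst h2
        exact ⟨List.mem_cons_self, hx, he⟩

def construct_name (lst : List String) : String :=
  match lst with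
  | [] => ""  -- Python: lst.pop(0) raises IndexError; excluded by Pre_construct_name
  | s :: rest =>
    match h : pyScanA s rest with
    | none => s
    | some (ng, m) =>
      match hr : PySem.List.remove? rest ng with
      | some rest' => construct_name (m :: rest')
      | none => ""  -- unreachable: ng ∈ rest, so lst.remove(ng) cannot raise
termination_by lst.length
decreasing_by
  have hmem := (pyScanA_sound s rest ng m h).1
  have := PySem.List.remove?_eq_some_erase rest ng hmem
  rw [this] at hr
  injection hr with hr
  subst hr
  have := List.length_erase_of_mem hmem
  simp [this]
  have : 0 < rest.length := List.length_pos_of_mem hmem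
  omega

-- ===== PORT B =====
-- B's `for i, ng in enumerate(lst)` scan: index of first truthy merge, and the merge.
def scanB (s : String) : List String → Option (Nat × String)
  | [] => none
  | ng :: rest =>
    match merge_overlap s ng with
    | some m =>
      if m = "" then (scanB s rest).map (fun p => (p.1 + 1, p.2))
      else some (0, m)
    | none => (scanB s rest).map (fun p => (p.1 + 1, p.2))

theorem scanB_lt (s : String) (l : List String) (i : Nat) (m : String)
    (h : scanB s l = some (i, m)) : i < l.length := by
  induction l generalizing i m with
  | nil => simp [scanB] at h
  | cons x rest ih =>
    simp only [scanB] at h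
    cases hx : merge_overlap s x with
    | none =>
      rw [hx] at h
      cases hrec : scanB s rest with
      | none => rw [hrec] at h; simp at h
      | some p =>
        rw [hrec, Option.map_some] at h
        have h' : p.1 + 1 = i := congrArg Prod.fst (Option.some.inj h)
        have hp := ih p.1 p.2 (by rw [hrec])
        simp only [List.length_cons]
        omega
    | some mx =>
      rw [hx] at h
      replace h : (if mx = "" then (scanB s rest).map (fun p => (p.1 + 1, p.2))
          else some (0, mx)) = some (i, m) := h
      by_cases he : mx = ""
      · rw [if_pos he] at h
        cases hrec : scanB s rest with
        | none => rw [hrec] at h; simp at h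
        | some p =>
          rw [hrec, Option.map_some] at h
          have h' : p.1 + 1 = i := congrArg Prod.fst (Option.some.inj h)
          have hp := ih p.1 p.2 (by rw [hrec])
          simp only [List.length_cons]
          omega
      · simp [he] at h
        rcases h with ⟨h1, _⟩
        simp [← h1]

-- B's while-loop: s is the current name, cur the remaining n-grams.
def mergeLoopB (s : String) (cur : List String) : String :=
  match h : scanB s cur with
  | none => s
  | some (i, m) => mergeLoopB m (cur.eraseIdx i)
termination_by cur.length
decreasing_by
  have := scanB_lt s cur i m h
  have := List.length_eraseIdx_of_lt this
  omega

def construct_name_alt (lst : List String) : String :=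
  match lst with
  | [] => ""  -- Python: lst.pop(0) raises IndexError; excluded by Pre_construct_name
  | s :: rest => mergeLoopB s rest

-- ===== PRECONDITION & SPEC =====
-- Pre_ excludes exactly the inputs where A raises IndexError: the empty list
-- (pop from empty) and any list of ≥ 2 elements containing a whitespace-only
-- string (merge_overlap indexes into an empty split).
def Pre_construct_name (lst : List String) : Prop :=
  lst ≠ [] ∧ (lst.length = 1 ∨ ∀ x ∈ lst, PySem.Str.split₀ x ≠ [])
instance (lst : List String) : Decidable (Pre_construct_name lst) := by
  unfold Pre_construct_name; infer_instance
def pvWitness_construct_name : List String := ["harry potter", "potter movie"]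

def Spec_construct_name (lst : List String) (out : String) : Prop := out = construct_name_alt lst
instance (lst : List String) (out : String) : Decidable (Spec_construct_name lst out) := by unfold Spec_construct_name; infer_instance

-- ===== CLAIM (what is proved, stated in full; the proofs are below) =====
def Claim_equal_construct_name : Prop := ∀ (lst : List String), Dom_construct_name lst → Pre_construct_name lst → Spec_construct_name lst (construct_name lst)

-- ===== LEMMAS AND PROOFS =====

-- The two scans agree: either both miss, or they pick the same merge, and removing
-- the first occurrence of the hit value (A) is erasing the hit index (B).
theorem scan_agree (s : String) (l : List String) :
    (pyScanA s l = none ∧ scanB s l = none) ∨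
    ∃ ng m i, pyScanA s l = some (ng, m) ∧ scanB s l = some (i, m) ∧
      PySem.List.remove? l ng = some (l.eraseIdx i) := by
  induction l with
  | nil => left; exact ⟨rfl, rfl⟩
  | cons x rest ih =>
    by_cases hhit : ∃ m, merge_overlap s x = some m ∧ m ≠ ""
    · rcases hhit with ⟨m, hm, hne⟩
      right
      exact ⟨x, m, 0, by simp [pyScanA, hm, hne], by simp [scanB, hm, hne], by simp⟩
    · -- x is a miss: both scans recurse on rest
      push Not at hhit
      have hstepA : pyScanA s (x :: rest) = pyScanA s rest := by
        cases hx : merge_overlap s x with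
        | none => simp [pyScanA, hx]
        | some mx => have := hhit mx hx; simp [pyScanA, hx, this]
      have hstepB : scanB s (x :: rest) = (scanB s rest).map (fun p => (p.1 + 1, p.2)) := by
        cases hx : merge_overlap s x with
        | none => simp [scanB, hx]
        | some mx => have := hhit mx hx; simp [scanB, hx, this]
      rcases ih with ⟨h1, h2⟩ | ⟨ng, m, i, h1, h2, h3⟩
      · left; rw [hstepA, hstepB, h1, h2]; exact ⟨rfl, rfl⟩
      · right
        refine ⟨ng, m, i + 1, by rw [hstepA]; exact h1, by rw [hstepB, h2]; rfl, ?_⟩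
        have hxne : x ≠ ng := by
          intro he
          rcases pyScanA_sound s rest ng m h1 with ⟨_, hmo, hne⟩
          exact hne (hhit m (by rw [he]; exact hmo))
        rw [PySem.List.remove?_cons_of_ne rest hxne, h3]
        rfl

-- Unfolding equations for the two well-founded drivers.
theorem construct_name_cons_none (s : String) (l : List String)
    (h : pyScanA s l = none) : construct_name (s :: l) = s := by
  rw [construct_name]
  split
  · rfl
  · next ng m heq => rw [h] at heq; cases heq

theorem construct_name_cons_some (s : String) (l : List String) (ng m : String)
    (rest' : List String) (h : pyScanA s l = some (ng, m))
    (hr : PySem.List.remove? l ng = some rest') :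
    construct_name (s :: l) = construct_name (m :: rest') := by
  rw [construct_name]
  split
  · next heq => rw [h] at heq; cases heq
  · next ng' m' heq =>
    rw [h] at heq
    injection heq with heq
    injection heq with e1 e2
    subst e1; subst e2
    split
    · next rest'' hre => rw [hr] at hre; injection hre with hre; rw [hre]
    · next hre => rw [hr] at hre; cases hre

theorem mergeLoopB_none (s : String) (cur : List String)
    (h : scanB s cur = none) : mergeLoopB s cur = s := by
  rw [mergeLoopB]
  split
  · rfl
  · next i m heq => rw [h] at heq; cases heq

theorem mergeLoopB_some (s : String) (cur : List String) (i : Nat) (m : String)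
    (h : scanB s cur = some (i, m)) : mergeLoopB s cur = mergeLoopB m (cur.eraseIdx i) := by
  rw [mergeLoopB]
  split
  · next heq => rw [h] at heq; cases heq
  · next i' m' heq =>
    rw [h] at heq
    injection heq with heq
    injection heq with e1 e2
    subst e1; subst e2
    rfl

theorem main_agree (n : Nat) : ∀ (l : List String) (s : String), l.length ≤ n →
    construct_name (s :: l) = mergeLoopB s l := by
  induction n with
  | zero =>
    intro l s hl
    have : l = [] := List.eq_nil_of_length_eq_zero (Nat.le_zero.mp hl)
    subst this
    rw [construct_name_cons_none s [] rfl, mergeLoopB_none s [] rfl]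
  | succ n ih =>
    intro l s hl
    rcases scan_agree s l with ⟨h1, h2⟩ | ⟨ng, m, i, h1, h2, h3⟩
    · rw [construct_name_cons_none s l h1, mergeLoopB_none s l h2]
    · rw [construct_name_cons_some s l ng m (l.eraseIdx i) h1 h3,
          mergeLoopB_some s l i m h2]
      have hlt : i < l.length := scanB_lt s l i m h2
      have hlen : (l.eraseIdx i).length ≤ n := by
        have := List.length_eraseIdx_of_lt hlt
        omega
      exact ih (l.eraseIdx i) m hlen

-- ===== VERDICT (by name: the statement is the Claim_ definition above) =====
theorem construct_name_spec : Claim_equal_construct_name := by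
  intro lst _ _
  unfold Spec_construct_name
  cases lst with
  | nil => rw [construct_name]; rfl
  | cons s rest =>
    show construct_name (s :: rest) = mergeLoopB s rest
    exact main_agree rest.length rest s le_rfl
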